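-- pv_equiv track=rewrite | github.com/CameronJ2/leetcode | NeetCode/Arrays & Hashing/36. Valid Sudoku/ValidSudoku.py | squareValidation
-- ===== SOURCE A (Python) =====
-- from typing import List
--
-- def squareValidation(board: List[List[str]], rowLower: int, rowHigher: int, columnLower: int, columnHigher: int) -> bool:
--         collectionSet: set = set()
--         for row in board[rowLower:rowHigher]:
--             for item in row[columnLower:columnHigher]:
--                 if (item == "."):
--                     continue
--                 if (item in collectionSet):
--                     return False
--                 collectionSet.add(item)
--         return True
-- ===== SOURCE B (Python) =====
-- from typing import List
--
-- def squareValidation(board: List[List[str]], rowLower: int, rowHigher: int, columnLower: int, columnHigher: int) -> bool: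
--     digits = [item
--               for row in board[rowLower:rowHigher]
--               for item in row[columnLower:columnHigher]
--               if item != "."]
--     for i in range(len(digits)):
--         if digits[i] in digits[i + 1:]:
--             return False
--     return True
-- ===== Notes on version B (the rewrite author's own statement) =====
-- stated objective: alternative
-- what changed: B uses no set at all: it first flattens the subregion into one list of non-dot entries, then decides uniqueness by a brute-force pairwise check comparing each entry against the entries after it, trading A's hash set and early-exit single pass for a set-free quadratic scan over the (small, fixed-size) subregion.
import Mathlib
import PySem

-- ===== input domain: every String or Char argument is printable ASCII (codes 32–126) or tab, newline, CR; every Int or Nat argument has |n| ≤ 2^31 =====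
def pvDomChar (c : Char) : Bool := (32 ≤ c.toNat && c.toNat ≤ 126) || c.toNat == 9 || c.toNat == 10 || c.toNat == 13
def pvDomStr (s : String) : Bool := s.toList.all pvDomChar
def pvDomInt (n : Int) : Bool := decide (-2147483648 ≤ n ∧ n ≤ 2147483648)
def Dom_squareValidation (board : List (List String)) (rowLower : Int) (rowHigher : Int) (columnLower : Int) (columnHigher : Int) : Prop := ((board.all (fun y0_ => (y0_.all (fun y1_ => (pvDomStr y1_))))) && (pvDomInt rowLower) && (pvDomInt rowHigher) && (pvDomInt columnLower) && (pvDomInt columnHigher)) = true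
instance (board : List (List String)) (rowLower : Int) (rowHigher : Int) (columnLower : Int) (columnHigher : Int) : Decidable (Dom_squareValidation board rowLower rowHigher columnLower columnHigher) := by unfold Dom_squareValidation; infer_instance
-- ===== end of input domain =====

-- B drops A's hash set and early-exit single pass: it flattens the subregion's non-dot entries
-- into one list and brute-forces uniqueness by comparing each entry against the entries after it
-- (alternative set-free decomposition, not faster); return values agree everywhere.

-- ===== PORT A =====
-- inner 'for item in row[columnLower:columnHigher]': none = the 'return False' path
def pvLoopInner (items : List String) (s : PySem.Set String) : Option (PySem.Set String) :=
  match items with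
  | [] => some s
  | item :: rest =>
    if item == "." then pvLoopInner rest s
    else if PySem.Set.contains s item then none
    else pvLoopInner rest (PySem.Set.add s item)

-- outer 'for row in board[rowLower:rowHigher]'
def pvLoopOuter (rows : List (List String)) (columnLower columnHigher : Int)
    (s : PySem.Set String) : Option (PySem.Set String) :=
  match rows with
  | [] => some s
  | row :: rest =>
    match pvLoopInner (PySem.List.slice row (some columnLower) (some columnHigher)) s with
    | none => none
    | some s' => pvLoopOuter rest columnLower columnHigher s'

def squareValidation (board : List (List String)) (rowLower : Int) (rowHigher : Int) (columnLower : Int) (columnHigher : Int) : Bool :=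
  (pvLoopOuter (PySem.List.slice board (some rowLower) (some rowHigher)) columnLower columnHigher PySem.Set.empty).isSome

-- ===== PORT B =====
-- 'for i in range(len(digits)): if digits[i] in digits[i+1:]: return False' — at each step the
-- current element is digits[i] and the tail digits[i+1:], i.e. structural recursion on the list.
def pvPairScan (digits : List String) : Bool :=
  match digits with
  | [] => true
  | x :: rest => if rest.contains x then false else pvPairScan rest

def squareValidation_alt (board : List (List String)) (rowLower : Int) (rowHigher : Int) (columnLower : Int) (columnHigher : Int) : Bool :=
  let digits : List String :=
    (PySem.List.slice board (some rowLower) (some rowHigher)).flatMap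
      (fun row => (PySem.List.slice row (some columnLower) (some columnHigher)).filter
        (fun item => !(item == ".")))
  pvPairScan digits

-- ===== PRECONDITION & SPEC =====
def Spec_squareValidation (board : List (List String)) (rowLower : Int) (rowHigher : Int) (columnLower : Int) (columnHigher : Int) (out : Bool) : Prop := out = squareValidation_alt board rowLower rowHigher columnLower columnHigher
instance (board : List (List String)) (rowLower : Int) (rowHigher : Int) (columnLower : Int) (columnHigher : Int) (out : Bool) : Decidable (Spec_squareValidation board rowLower rowHigher columnLower columnHigher out) := by unfold Spec_squareValidation; infer_instance

-- ===== CLAIM (what is proved, stated in full; the proofs are below) =====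
def Claim_equal_squareValidation : Prop := ∀ (board : List (List String)) (rowLower : Int) (rowHigher : Int) (columnLower : Int) (columnHigher : Int), Dom_squareValidation board rowLower rowHigher columnLower columnHigher → Spec_squareValidation board rowLower rowHigher columnLower columnHigher (squareValidation board rowLower rowHigher columnLower columnHigher)

-- ===== LEMMAS AND PROOFS =====

-- A's inner loop succeeds iff the filtered items extend s without duplicates, returning s ++ them.
theorem pvLoopInner_char (items : List String) (s : PySem.Set String) (hs : s.Nodup) :
    pvLoopInner items s =
      if (s ++ items.filter (fun x => !(x == "."))).Nodup
      then some (s ++ items.filter (fun x => !(x == ".")))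
      else none := by
  induction items generalizing s with
  | nil => simp [pvLoopInner, hs]
  | cons item rest ih =>
    by_cases hdot : item = "."
    · simpa [pvLoopInner, hdot] using ih s hs
    · have hne : (item == ".") = false := by simp [hdot]
      by_cases hmem : item ∈ s
      · have hnd : ¬ (s ++ item :: rest.filter (fun x => !(x == "."))).Nodup := by
          intro h
          exact (List.disjoint_of_nodup_append h) hmem (by simp)
        simp [pvLoopInner, hne, hmem, hnd]
      · have hnd' : (s ++ [item]).Nodup :=
          List.Nodup.append hs (List.nodup_singleton item)
            (by intro a ha hb; simp at hb; exact hmem (hb ▸ ha))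
        rw [pvLoopInner]
        simp [PySem.Set.add, hne, hmem, ih _ hnd', List.append_assoc]

-- A's outer loop over the remaining rows, in terms of the flattened filtered digits.
theorem pvLoopOuter_char (rows : List (List String)) (cl ch : Int) (s : PySem.Set String)
    (hs : s.Nodup) :
    pvLoopOuter rows cl ch s =
      (if (s ++ rows.flatMap (fun row =>
            (PySem.List.slice row (some cl) (some ch)).filter (fun item => !(item == ".")))).Nodup
       then some (s ++ rows.flatMap (fun row =>
            (PySem.List.slice row (some cl) (some ch)).filter (fun item => !(item == "."))))
       else none) := by
  induction rows generalizing s with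
  | nil => simp [pvLoopOuter, hs]
  | cons row rest ih =>
    rw [pvLoopOuter, pvLoopInner_char _ _ hs]
    set d1 := (PySem.List.slice row (some cl) (some ch)).filter (fun item => !(item == ".")) with hd1
    rw [List.flatMap_cons, ← hd1]
    by_cases h1 : (s ++ d1).Nodup
    · have := ih (s ++ d1) h1
      simp only [h1, if_true, this, List.append_assoc]
    · have h2 : ¬ (s ++ (d1 ++ rest.flatMap (fun row =>
          (PySem.List.slice row (some cl) (some ch)).filter (fun item => !(item == "."))))).Nodup := by
        rw [← List.append_assoc]
        exact fun h => h1 ((List.sublist_append_left _ _).nodup h)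
      simp [h1, h2]

-- B's pairwise scan decides exactly Nodup.
theorem pvPairScan_eq_nodup (xs : List String) : pvPairScan xs = true ↔ xs.Nodup := by
  induction xs with
  | nil => simp [pvPairScan]
  | cons x rest ih =>
    by_cases hmem : x ∈ rest
    · simp [pvPairScan, hmem]
    · simp [pvPairScan, hmem, ih]

-- ===== VERDICT (by name: the statement is the Claim_ definition above) =====
theorem squareValidation_spec : Claim_equal_squareValidation := by
  intro board rowLower rowHigher columnLower columnHigher _
  unfold Spec_squareValidation squareValidation squareValidation_alt
  rw [pvLoopOuter_char _ _ _ _ (by simp [PySem.Set.empty])]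
  simp only [PySem.Set.empty, List.nil_append]
  set digits : List String :=
    (PySem.List.slice board (some rowLower) (some rowHigher)).flatMap
      (fun row => (PySem.List.slice row (some columnLower) (some columnHigher)).filter
        (fun item => !(item == "."))) with hd
  by_cases hn : digits.Nodup
  · simp [hn, (pvPairScan_eq_nodup digits).mpr hn]
  · have : pvPairScan digits ≠ true := fun h => hn ((pvPairScan_eq_nodup digits).mp h)
    simp [hn, this]
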